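-- pv_equiv track=rewrite | github.com/jprsurendra/core_python | examples/shipment_number_identifier.py | validate_container
-- ===== SOURCE A (Python) =====
-- def validate_container(number: str) -> bool:
--     """Validate container number using ISO 6346 standard"""
--     if len(number) != 11:
--         return False
--
--     # Container number validation
--     mapping = {
--         'A': 10, 'B': 12, 'C': 13, 'D': 14, 'E': 15, 'F': 16, 'G': 17, 'H': 18, 'I': 19,
--         'J': 20, 'K': 21, 'L': 23, 'M': 24, 'N': 25, 'O': 26, 'P': 27, 'Q': 28, 'R': 29,
--         'S': 30, 'T': 31, 'U': 32, 'V': 34, 'W': 35, 'X': 36, 'Y': 37, 'Z': 38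
--     }
--
--     try:
--         total = 0
--         for i, char in enumerate(number[:10]):
--             if char.isdigit():
--                 value = int(char)
--             else:
--                 value = mapping.get(char, 0)
--
--             total += value * (2 ** i)
--
--         check_digit = total % 11
--         if check_digit == 10:
--             check_digit = 0
--
--         return check_digit == int(number[-1])
--     except:
--         return False
-- ===== SOURCE B (Python) =====
-- ALPHABET = "0123456789A\x00BCDEFGHIJK\x00LMNOPQRSTU\x00VWXYZ"
--
--
-- def validate_container(number: str) -> bool:
--     """ISO 6346 check via positional lookup in one alphabet string and
--     right-to-left Horner evaluation kept reduced mod 11."""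
--     if len(number) != 11:
--         return False
--     d = ALPHABET.find(number[10])
--     if not 0 <= d <= 9:
--         return False
--     t = 0
--     for ch in reversed(number[:10]):
--         t = (2 * t + max(ALPHABET.find(ch), 0)) % 11
--     return t % 10 == d
-- ===== Notes on version B (the rewrite author's own statement) =====
-- stated objective: alternative
-- what changed: Replaces the 26-entry dict plus enumerate/2**i sum, try/except and 10-to-0 remap branch with a single positional alphabet string (char value = its index, gaps padded with NUL) queried via str.find, a right-to-left Horner evaluation kept reduced mod 11 at every step, and an up-front find-based check-digit test with a final %10 comparison.
import Mathlib
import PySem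

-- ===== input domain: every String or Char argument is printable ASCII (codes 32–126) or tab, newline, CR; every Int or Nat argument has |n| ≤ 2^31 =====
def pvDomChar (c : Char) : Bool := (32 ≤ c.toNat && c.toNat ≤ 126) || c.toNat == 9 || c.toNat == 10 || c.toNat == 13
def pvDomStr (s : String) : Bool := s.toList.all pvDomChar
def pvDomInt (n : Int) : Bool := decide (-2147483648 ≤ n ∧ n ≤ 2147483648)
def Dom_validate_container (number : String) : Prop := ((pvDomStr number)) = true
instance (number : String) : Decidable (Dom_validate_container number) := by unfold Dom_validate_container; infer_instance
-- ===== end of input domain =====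

-- B replaces A's 26-entry dict + enumerate/2**i sum + try/except + 10→0 branch with a
-- positional alphabet string queried by str.find, a right-to-left Horner evaluation kept
-- reduced mod 11, and an up-front check-digit test with a final %10; objective: alternative.

-- ===== PORT A =====
def vcMapping : PySem.Dict Char Int := PySem.Dict.ofList
  [('A',10),('B',12),('C',13),('D',14),('E',15),('F',16),('G',17),('H',18),('I',19),
   ('J',20),('K',21),('L',23),('M',24),('N',25),('O',26),('P',27),('Q',28),('R',29),
   ('S',30),('T',31),('U',32),('V',34),('W',35),('X',36),('Y',37),('Z',38)]

-- int(char) after char.isdigit(): on the ASCII domain it always succeeds, so .getD 0 is exact.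
def vcValueA (c : Char) : Int :=
  if PySem.Chars.isdigit c then (PySem.Int.ofChars? [c]).getD 0
  else vcMapping.getD c 0

def validate_container (number : String) : Bool :=
  let cs := number.toList
  if cs.length ≠ 11 then false
  else
    -- try: the only statements that can raise are int(char) (never, after isdigit) and int(number[-1])
    let total := (PySem.List.enumerate (PySem.List.slice cs none (some 10)) 0).foldl
      (fun total p => total + vcValueA p.2 * 2 ^ p.1.toNat) 0
    let check_digit := PySem.Int.mod total 11
    let check_digit := if check_digit = 10 then 0 else check_digit
    match PySem.List.pyGet? cs (-1) with
    | none => false                      -- unreachable: length = 11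
    | some last =>
      match PySem.Int.ofChars? [last] with
      | none => false                    -- except: int(number[-1]) raised ValueError
      | some d => check_digit == d

-- ===== PORT B =====
def vcAlphabet : List Char := "0123456789A\x00BCDEFGHIJK\x00LMNOPQRSTU\x00VWXYZ".toList

-- max(ALPHABET.find(ch), 0): B's per-character value
def vcValueB (c : Char) : Int := max (PySem.Chars.find vcAlphabet [c]) 0

def vcLoopB : List Char → Int → Int
  | [], t => t
  | c :: r, t => vcLoopB r (PySem.Int.mod (2 * t + vcValueB c) 11)

def validate_container_alt (number : String) : Bool :=
  let cs := number.toList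
  if cs.length ≠ 11 then false
  else match PySem.List.pyGet? cs 10 with
    | none => false                      -- unreachable: length = 11
    | some last =>
      let d := PySem.Chars.find vcAlphabet [last]
      if ¬ ((0:Int) ≤ d ∧ d ≤ 9) then false
      else
        let t := vcLoopB (PySem.List.slice cs none (some 10)).reverse 0
        PySem.Int.mod t 10 == d

-- ===== PRECONDITION & SPEC =====
def Spec_validate_container (number : String) (out : Bool) : Prop := out = validate_container_alt number
instance (number : String) (out : Bool) : Decidable (Spec_validate_container number out) := by unfold Spec_validate_container; infer_instance

-- ===== CLAIM =====
def Claim_equal_validate_container : Prop := ∀ (number : String), Dom_validate_container number → Spec_validate_container number (validate_container number)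

-- ===== LEMMAS AND PROOFS =====

-- the unreduced Horner evaluation
def vcHorner : List Char → Int → Int
  | [], t => t
  | c :: r, t => vcHorner r (2 * t + vcValueB c)

-- on the 127 ASCII codes: the table value equals the alphabet-index value; the
-- alphabet index lies in 0..9 exactly on digits; on a digit it is int(c); and
-- int('<c>') raises exactly when c is not a digit
set_option maxRecDepth 8192 in
theorem vcChar_facts : ∀ n : Nat, n < 127 → pvDomChar (Char.ofNat n) = true →
    vcValueA (Char.ofNat n) = vcValueB (Char.ofNat n) ∧
    ((0 ≤ PySem.Chars.find vcAlphabet [Char.ofNat n] ∧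
      PySem.Chars.find vcAlphabet [Char.ofNat n] ≤ 9)
        ↔ PySem.Chars.isdigit (Char.ofNat n) = true) ∧
    (PySem.Int.ofChars? [Char.ofNat n] = none ↔ PySem.Chars.isdigit (Char.ofNat n) = false) ∧
    (PySem.Chars.isdigit (Char.ofNat n) = true →
      PySem.Int.ofChars? [Char.ofNat n] = some (PySem.Chars.find vcAlphabet [Char.ofNat n])) := by
  decide

theorem vcDom_lt (c : Char) (h : pvDomChar c = true) : c.toNat < 127 := by
  simp only [pvDomChar, Bool.or_eq_true, Bool.and_eq_true, decide_eq_true_eq, beq_iff_eq] at h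
  omega

theorem vcValue_eq (c : Char) (h : pvDomChar c = true) : vcValueA c = vcValueB c := by
  have := (vcChar_facts c.toNat (vcDom_lt c h) (by rwa [Char.ofNat_toNat])).1
  rwa [Char.ofNat_toNat] at this

theorem vcDigit_iff (c : Char) (h : pvDomChar c = true) :
    (0 ≤ PySem.Chars.find vcAlphabet [c] ∧ PySem.Chars.find vcAlphabet [c] ≤ 9)
      ↔ PySem.Chars.isdigit c = true := by
  have := (vcChar_facts c.toNat (vcDom_lt c h) (by rwa [Char.ofNat_toNat])).2.1
  rwa [Char.ofNat_toNat] at this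

theorem vcOfChars_none_iff (c : Char) (h : pvDomChar c = true) :
    PySem.Int.ofChars? [c] = none ↔ PySem.Chars.isdigit c = false := by
  have := (vcChar_facts c.toNat (vcDom_lt c h) (by rwa [Char.ofNat_toNat])).2.2.1
  rwa [Char.ofNat_toNat] at this

theorem vcOfChars_digit (c : Char) (h : pvDomChar c = true)
    (hd : PySem.Chars.isdigit c = true) :
    PySem.Int.ofChars? [c] = some (PySem.Chars.find vcAlphabet [c]) := by
  have := (vcChar_facts c.toNat (vcDom_lt c h) (by rwa [Char.ofNat_toNat])).2.2.2
  rw [Char.ofNat_toNat] at this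
  exact this hd

-- Horner is affine in its accumulator
theorem vcHorner_lin (m : List Char) (a : Int) :
    vcHorner m a = a * 2 ^ m.length + vcHorner m 0 := by
  induction m generalizing a with
  | nil => simp [vcHorner]
  | cons c r ih =>
    simp only [vcHorner, List.length_cons]
    rw [ih (2 * a + vcValueB c), ih (2 * 0 + vcValueB c)]
    ring

-- reducing the accumulator mod 11 at each step is reduction of the result mod 11
theorem vcLoopB_eq_horner (m : List Char) (t : Int) (h0 : 0 ≤ t) (h1 : t < 11) :
    vcLoopB m t = PySem.Int.mod (vcHorner m t) 11 := by
  induction m generalizing t with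
  | nil =>
    simp only [vcLoopB, vcHorner, PySem.Int.mod_eq_emod_of_pos (by norm_num : (0:Int) < 11)]
    omega
  | cons c r ih =>
    simp only [vcLoopB, vcHorner,
      PySem.Int.mod_eq_emod_of_pos (by norm_num : (0:Int) < 11)] at ih ⊢
    rw [ih _ (Int.emod_nonneg _ (by norm_num)) (Int.emod_lt_of_pos _ (by norm_num))]
    rw [vcHorner_lin r ((2 * t + vcValueB c) % 11), vcHorner_lin r (2 * t + vcValueB c)]
    conv_lhs => rw [Int.add_emod, Int.mul_emod, Int.emod_emod_of_dvd _ (by norm_num : (11:Int) ∣ 11)]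
    conv_rhs => rw [Int.add_emod, Int.mul_emod]

-- appending a character to a Horner run
theorem vcHorner_append (m : List Char) (c : Char) (t : Int) :
    vcHorner (m ++ [c]) t = 2 * vcHorner m t + vcValueB c := by
  induction m generalizing t with
  | nil => simp [vcHorner]
  | cons d r ih => simp only [List.cons_append, vcHorner, ih]

-- Horner over the reversed list is the 2^i-weighted sum, written as a foldr
def vcSumB : List Char → Int
  | [] => 0
  | c :: r => vcValueB c + 2 * vcSumB r

theorem vcHorner_reverse (l : List Char) : vcHorner l.reverse 0 = vcSumB l := by
  induction l with
  | nil => simp [vcHorner, vcSumB]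
  | cons c r ih =>
    simp only [List.reverse_cons, vcHorner_append, ih, vcSumB]
    ring

-- A's indexed fold equals the same weighted sum (given per-char agreement)
theorem vcFoldA_eq (l : List Char) (k : Nat) (total : Int)
    (h : ∀ c ∈ l, vcValueA c = vcValueB c) :
    (PySem.List.enumerate l (k : Int)).foldl
      (fun total p => total + vcValueA p.2 * 2 ^ p.1.toNat) total
      = total + 2 ^ k * vcSumB l := by
  induction l generalizing k total with
  | nil => simp [PySem.List.enumerate_nil, vcSumB]
  | cons c rest ih =>
    rw [PySem.List.enumerate_cons]
    simp only [List.foldl_cons, vcSumB]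
    have hk : ((k : Int) + 1) = ((k + 1 : Nat) : Int) := by push_cast; ring
    rw [hk, ih (k + 1) _ (fun c hc => h c (List.mem_cons_of_mem _ hc))]
    rw [h c (List.mem_cons_self ..)]
    have : ((k : Int)).toNat = k := by simp
    rw [this]
    ring

-- remapping 10 → 0 is reduction mod 10 (on a value already reduced mod 11)
theorem vcCheck_eq (t : Int) :
    (if t % 11 = 10 then (0 : Int) else t % 11) = t % 11 % 10 := by
  split_ifs with h
  · omega
  · omega

-- ===== VERDICT =====
theorem validate_container_spec : Claim_equal_validate_container := by
  intro number hdom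
  unfold Spec_validate_container validate_container validate_container_alt
  have hdomc : ∀ c ∈ number.toList, pvDomChar c = true := by
    intro c hc
    exact List.all_eq_true.mp hdom c hc
  by_cases hlen : number.toList.length = 11
  · simp only [hlen, ne_eq]
    norm_num
    have h10lt : 10 < number.toList.length := by omega
    have h10 : PySem.List.pyGet? number.toList (10 : Int) = some number.toList[10] := by
      have := PySem.List.pyGet?_ofNat number.toList 10 h10lt
      simpa using this
    have hneg : PySem.List.pyGet? number.toList (-1) = some number.toList[10] := by
      rw [PySem.List.pyGet?_neg_one, List.getLast?_eq_getElem?, hlen]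
      simp [List.getElem?_eq_getElem h10lt]
    have hslice : PySem.List.slice number.toList none (some (10 : Int))
        = number.toList.take 10 := by
      rw [PySem.List.slice_to number.toList (by norm_num : (0:Int) ≤ 10)]
      rfl
    have hlast : pvDomChar number.toList[10] = true :=
      hdomc _ (List.getElem_mem h10lt)
    have htot := vcFoldA_eq (number.toList.take 10) 0 0
      (fun c hc => vcValue_eq c (hdomc c (List.mem_of_mem_take hc)))
    have hloop : vcLoopB (number.toList.take 10).reverse 0
        = PySem.Int.mod (vcSumB (number.toList.take 10)) 11 := by
      rw [vcLoopB_eq_horner _ _ le_rfl (by norm_num), vcHorner_reverse]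
    rw [h10, hneg, hslice]
    simp only [Nat.cast_zero] at htot
    rw [htot, hloop]
    simp only [pow_zero, one_mul, zero_add]
    cases hd : PySem.Chars.isdigit number.toList[10] with
    | false =>
      have h0 : PySem.Int.ofChars? [number.toList[10]] = none :=
        (vcOfChars_none_iff _ hlast).mpr hd
      have hfind : ¬ ((0:Int) ≤ PySem.Chars.find vcAlphabet [number.toList[10]] ∧
          PySem.Chars.find vcAlphabet [number.toList[10]] ≤ 9) := by
        rw [vcDigit_iff _ hlast, hd]; simp
      have hb : (decide ((0:Int) ≤ PySem.Chars.find vcAlphabet [number.toList[10]]) &&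
          !decide ((9:Int) < PySem.Chars.find vcAlphabet [number.toList[10]])) = false := by
        simp only [Bool.and_eq_false_iff, decide_eq_false_iff_not, Bool.not_eq_false',
          decide_eq_true_eq]
        omega
      rw [h0]
      simp [hb]
    | true =>
      have hfind : ((0:Int) ≤ PySem.Chars.find vcAlphabet [number.toList[10]] ∧
          PySem.Chars.find vcAlphabet [number.toList[10]] ≤ 9) :=
        (vcDigit_iff _ hlast).mpr hd
      have hsome := vcOfChars_digit _ hlast hd
      have hb : (decide ((0:Int) ≤ PySem.Chars.find vcAlphabet [number.toList[10]]) &&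
          !decide ((9:Int) < PySem.Chars.find vcAlphabet [number.toList[10]])) = true := by
        simp only [Bool.and_eq_true, decide_eq_true_eq, Bool.not_eq_true', decide_eq_false_iff_not]
        omega
      rw [hsome]
      simp only [hb, Bool.true_and,
        PySem.Int.mod_eq_emod_of_pos (by norm_num : (0:Int) < 11)]
      rw [vcCheck_eq]
  · have h : number.toList.length ≠ 11 := hlen
    simp only [ne_eq, h]
    norm_num
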